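-- pv_equiv track=rewrite | github.com/eugen-paul/ProblemsPython | 1402_ReducingDishes.py | maxSatisfaction
-- ===== SOURCE A (Python) =====
-- from typing import Deque, List, Dict, Set, Tuple, Counter
--
-- def maxSatisfaction(satisfaction: List[int]) -> int:
--     satisfaction.sort()
--     sum_pos = 0
--     resp = 0
--
--     for n in reversed(satisfaction):
--         if -n > sum_pos:
--             break
--         resp += n + sum_pos
--         sum_pos += n
--
--     return resp
-- ===== SOURCE B (Python) =====
-- def maxSatisfaction(satisfaction):
--     satisfaction.sort()
--     n = len(satisfaction)
--     best = 0
--     for s in range(0, n):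
--         total = 0
--         for j in range(s, n):
--             total += (j - s + 1) * satisfaction[j]
--         if total > best:
--             best = total
--     return best
-- ===== Notes on version B (the rewrite author's own statement) =====
-- stated objective: alternative
-- what changed: Replaces A's greedy single reversed pass with running break-on-negative-gain accumulation by an exhaustive maximization: for every possible start index of a suffix of the sorted array, compute its weighted satisfaction sum with an inner loop and return the maximum (including 0 for the empty selection).
import Mathlib
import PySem

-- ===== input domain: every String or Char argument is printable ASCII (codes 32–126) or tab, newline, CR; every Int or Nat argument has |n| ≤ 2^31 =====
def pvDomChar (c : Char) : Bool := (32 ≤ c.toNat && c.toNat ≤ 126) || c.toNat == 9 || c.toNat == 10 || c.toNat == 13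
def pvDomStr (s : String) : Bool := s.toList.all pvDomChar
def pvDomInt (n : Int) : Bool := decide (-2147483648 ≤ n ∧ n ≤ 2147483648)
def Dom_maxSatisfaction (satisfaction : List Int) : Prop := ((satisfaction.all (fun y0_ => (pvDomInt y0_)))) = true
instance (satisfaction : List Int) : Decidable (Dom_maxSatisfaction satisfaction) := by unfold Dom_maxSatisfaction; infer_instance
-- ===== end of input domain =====

-- B replaces A's greedy break-on-negative-gain pass with brute-force maximization over all
-- suffix start indices of the sorted list (alternative algorithm, not faster).
-- Both A and B sort the argument in place; the equivalence proved is about the return value.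

-- ===== PORT A =====
-- the 'for n in reversed(satisfaction): … break …' loop of A
def pvALoop : List Int → Int → Int → Int
  | [], _, resp => resp
  | n :: rest, sum_pos, resp =>
    if -n > sum_pos then resp
    else pvALoop rest (sum_pos + n) (resp + (n + sum_pos))

def maxSatisfaction (satisfaction : List Int) : Int :=
  pvALoop (PySem.List.sorted satisfaction (fun x => x) false).reverse 0 0

-- ===== PORT B =====
def maxSatisfaction_alt (satisfaction : List Int) : Int :=
  (PySem.List.pyRange 0 ((PySem.List.sorted satisfaction (fun x => x) false).length : Int) 1).foldl
    (fun best s =>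
      let total := (PySem.List.pyRange s ((PySem.List.sorted satisfaction (fun x => x) false).length : Int) 1).foldl
        (fun t j => t + (j - s + 1) * PySem.List.pyGetD (PySem.List.sorted satisfaction (fun x => x) false) j 0) 0
      if total > best then total else best) 0

-- ===== PRECONDITION & SPEC =====
def Spec_maxSatisfaction (satisfaction : List Int) (out : Int) : Prop := out = maxSatisfaction_alt satisfaction
instance (satisfaction : List Int) (out : Int) : Decidable (Spec_maxSatisfaction satisfaction out) := by unfold Spec_maxSatisfaction; infer_instance

-- ===== CLAIM (what is proved, stated in full; the proofs are below) =====
def Claim_equal_maxSatisfaction : Prop := ∀ (satisfaction : List Int), Dom_maxSatisfaction satisfaction → Spec_maxSatisfaction satisfaction (maxSatisfaction satisfaction)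

-- ===== LEMMAS AND PROOFS =====

-- weighted sum of a list with weights 1,2,…,n from the FRONT: pvV [a,b,c] = 1a+2b+3c
def pvV : List Int → Int
  | [] => 0
  | x :: r => x + r.sum + pvV r

-- max over all prefixes (incl. empty) of the running weighted total, state (sum, total)
def pvM : List Int → Int → Int → Int
  | [], _, t => t
  | n :: r, s, t => max t (pvM r (s + n) (t + s + n))

-- the final running total after consuming the whole list
def pvTfin : List Int → Int → Int → Int
  | [], _, t => t
  | n :: r, s, t => pvTfin r (s + n) (t + s + n)

-- max over all suffixes of a (incl. empty) of their weighted sum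
def pvBmax : List Int → Int
  | [] => 0
  | x :: r => max (pvV (x :: r)) (pvBmax r)

theorem pvM_ge : ∀ (d : List Int) (s t : Int), t ≤ pvM d s t := by
  intro d
  induction d with
  | nil => intro s t; simp [pvM]
  | cons n r ih => intro s t; simp [pvM]

theorem pvM_le : ∀ (d : List Int) (s t : Int), s < 0 → (∀ x ∈ d, x ≤ 0) → pvM d s t ≤ t := by
  intro d
  induction d with
  | nil => intro s t _ _; simp [pvM]
  | cons n r ih =>
    intro s t hs hall
    have hn : n ≤ 0 := hall n (List.mem_cons_self ..)
    have h1 : pvM r (s + n) (t + s + n) ≤ t + s + n :=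
      ih (s + n) (t + s + n) (by omega) (fun x hx => hall x (List.mem_cons_of_mem _ hx))
    simp only [pvM]
    omega

theorem pvALoop_eq_pvM : ∀ (d : List Int) (s t : Int),
    List.Pairwise (fun a b => b ≤ a) d → 0 ≤ s → pvALoop d s t = pvM d s t := by
  intro d
  induction d with
  | nil => intro s t _ _; simp [pvALoop, pvM]
  | cons n r ih =>
    intro s t hp hs
    rcases List.pairwise_cons.mp hp with ⟨hle, hp'⟩
    by_cases hbr : -n > s
    · have hn : n < 0 := by omega
      have h1 : pvM r (s + n) (t + s + n) ≤ t + s + n :=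
        pvM_le r (s + n) (t + s + n) (by omega) (fun x hx => by have := hle x hx; omega)
      simp only [pvALoop, pvM, if_pos hbr]
      omega
    · have h1 : pvALoop r (s + n) (t + (n + s)) = pvM r (s + n) (t + s + n) := by
        rw [show t + (n + s) = t + s + n by ring]
        exact ih (s + n) (t + s + n) hp' (by omega)
      have h2 : t + s + n ≤ pvM r (s + n) (t + s + n) := pvM_ge r _ _
      simp only [pvALoop, pvM, if_neg hbr]
      rw [h1]
      omega

theorem pvTfin_append : ∀ (d e : List Int) (s t : Int),
    pvTfin (d ++ e) s t = pvTfin e (s + d.sum) (pvTfin d s t) := by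
  intro d
  induction d with
  | nil => intro e s t; simp [pvTfin]
  | cons n r ih =>
    intro e s t
    simp only [List.cons_append, pvTfin, ih, List.sum_cons]
    rw [add_assoc]

theorem pvM_append_singleton : ∀ (d : List Int) (x s t : Int),
    pvM (d ++ [x]) s t = max (pvM d s t) (pvTfin d s t + (s + d.sum) + x) := by
  intro d
  induction d with
  | nil =>
    intro x s t
    simp only [List.nil_append, pvM, pvTfin, List.sum_nil]
    congr 1
    ring
  | cons n r ih =>
    intro x s t
    simp only [List.cons_append, pvM, pvTfin, ih, List.sum_cons]
    rw [max_assoc]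
    congr 2
    ring

theorem pvTfin_reverse_eq_V : ∀ (a : List Int), pvTfin a.reverse 0 0 = pvV a := by
  intro a
  induction a with
  | nil => simp [pvTfin, pvV]
  | cons x r ih =>
    rw [List.reverse_cons, pvTfin_append, ih]
    simp only [pvTfin, pvV, List.sum_reverse]
    ring

theorem pvM_reverse_eq_Bmax : ∀ (a : List Int), pvM a.reverse 0 0 = pvBmax a := by
  intro a
  induction a with
  | nil => simp [pvM, pvBmax]
  | cons x r ih =>
    rw [List.reverse_cons, pvM_append_singleton, ih, pvTfin_reverse_eq_V]
    simp only [pvBmax, pvV, List.sum_reverse]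
    rw [max_comm]
    congr 1
    ring

-- pvW b c = weighted sum of b with weights c, c+1, …
def pvW : List Int → Int → Int
  | [], _ => 0
  | x :: r, c => c * x + pvW r (c + 1)

theorem pvW_shift : ∀ (b : List Int) (c : Int), pvW b (c + 1) = pvW b c + b.sum := by
  intro b
  induction b with
  | nil => intro c; simp [pvW]
  | cons x r ih => intro c; simp only [pvW, ih, List.sum_cons]; ring

theorem pvW_one_eq_V : ∀ (b : List Int), pvW b 1 = pvV b := by
  intro b
  induction b with
  | nil => simp [pvW, pvV]
  | cons x r ih =>
    simp only [pvW, pvV]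
    rw [show (1 : Int) + 1 = 1 + 1 by rfl, pvW_shift, ih]
    ring

theorem sum_range_weight : ∀ (b : List Int) (c : Int),
    ((List.range b.length).map (fun (k : Nat) => ((k : Int) + c) * b.getD k 0)).sum = pvW b c := by
  intro b
  induction b with
  | nil => intro c; simp [pvW]
  | cons x r ih =>
    intro c
    rw [List.length_cons, List.range_succ_eq_map]
    simp only [List.map_cons, List.map_map, List.sum_cons]
    have hpt : ∀ k : Nat, ((fun (k : Nat) => ((k : Int) + c) * (x :: r).getD k 0) ∘ Nat.succ) k
        = ((k : Int) + (c + 1)) * r.getD k 0 := by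
      intro k
      simp only [Function.comp_apply, List.getD_cons_succ]
      push_cast
      ring
    rw [List.map_congr_left (fun k _ => hpt k), ih, pvW, List.getD_cons_zero]
    push_cast
    ring

-- the inner loop of B computes the weighted sum of the suffix a.drop s
theorem inner_eq_V : ∀ (a : List Int) (s : Nat), s ≤ a.length →
    (PySem.List.pyRange (s : Int) (a.length : Int) 1).foldl
      (fun t j => t + (j - (s : Int) + 1) * PySem.List.pyGetD a j 0) 0 = pvV (a.drop s) := by
  intro a s hs
  rw [PySem.List.foldl_add, PySem.List.pyRange_one, List.map_map]
  have hlen : ((a.length : Int) - (s : Int)).toNat = (a.drop s).length := by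
    rw [List.length_drop]; omega
  rw [hlen]
  have hpt : ∀ k : Nat, k < (a.drop s).length →
      ((fun j => (j - (s : Int) + 1) * PySem.List.pyGetD a j 0) ∘ fun (k : Nat) => (s : Int) + (k : Int)) k
      = ((k : Int) + 1) * (a.drop s).getD k 0 := by
    intro k hk
    simp only [Function.comp_apply]
    have h1 : (s : Int) + (k : Int) = ((s + k : Nat) : Int) := by push_cast; ring
    rw [h1, PySem.List.pyGetD_natCast]
    have h2 : a.getD (s + k) 0 = (a.drop s).getD k 0 := by
      have hk' : s + k < a.length := by rw [List.length_drop] at hk; omega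
      rw [List.getD_eq_getElem _ _ hk', List.getD_eq_getElem _ _ hk]
      simp [List.getElem_drop]
    rw [h2]
    push_cast
    ring
  rw [List.map_congr_left (fun k hk => hpt k (List.mem_range.mp hk)),
    sum_range_weight (a.drop s) 1, pvW_one_eq_V]
  omega

theorem foldl_max_init : ∀ (L : List Nat) (g : Nat → Int) (b c : Int),
    List.foldl (fun acc k => max acc (g k)) (max b c) L
      = max c (List.foldl (fun acc k => max acc (g k)) b L) := by
  intro L
  induction L with
  | nil => intro g b c; simp [max_comm]
  | cons k0 t ih =>
    intro g b c
    simp only [List.foldl_cons]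
    rw [show max (max b c) (g k0) = max (max b (g k0)) c by
      rw [max_assoc, max_comm c (g k0), ← max_assoc]]
    exact ih g (max b (g k0)) c

theorem foldl_max_drops : ∀ (a : List Int),
    List.foldl (fun b (k : Nat) => max b (pvV (a.drop k))) 0 (List.range a.length) = pvBmax a := by
  intro a
  induction a with
  | nil => simp [pvBmax]
  | cons x r ih =>
    rw [List.length_cons, List.range_succ_eq_map]
    simp only [List.foldl_cons, List.foldl_map, List.drop_zero, List.drop_succ_cons]
    rw [foldl_max_init (List.range r.length) (fun k => pvV (r.drop k)) 0 (pvV (x :: r))]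
    rw [ih, pvBmax]

theorem outer_eq_Bmax : ∀ (a : List Int),
    (PySem.List.pyRange 0 (a.length : Int) 1).foldl (fun best s =>
      let total := (PySem.List.pyRange s (a.length : Int) 1).foldl
        (fun t j => t + (j - s + 1) * PySem.List.pyGetD a j 0) 0
      if total > best then total else best) 0 = pvBmax a := by
  intro a
  rw [PySem.List.pyRange_one]
  simp only [Int.sub_zero, Int.toNat_natCast, List.foldl_map]
  rw [← foldl_max_drops a]
  apply PySem.List.foldl_congr_mem
  intro acc k hk
  have hk' : k < a.length := List.mem_range.mp hk
  simp only [Int.zero_add]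
  rw [inner_eq_V a k (le_of_lt hk')]
  by_cases h : pvV (a.drop k) ≤ acc
  · rw [if_neg (by omega), max_eq_left h]
  · rw [if_pos (by omega), max_eq_right (by omega)]

-- ===== VERDICT (by name: the statement is the Claim_ definition above) =====
theorem maxSatisfaction_spec : Claim_equal_maxSatisfaction := by
  intro l _
  unfold Spec_maxSatisfaction maxSatisfaction maxSatisfaction_alt
  set a := PySem.List.sorted l (fun x => x) false with ha
  have hpair : List.Pairwise (fun x y => x ≤ y) a := PySem.List.sorted_pairwise l (fun x => x) 
  have hrev : List.Pairwise (fun x y => y ≤ x) a.reverse := by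
    rw [List.pairwise_reverse]; exact hpair
  simp only []
  rw [pvALoop_eq_pvM a.reverse 0 0 hrev le_rfl, pvM_reverse_eq_Bmax a, outer_eq_Bmax a]
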